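-- pv_equiv track=rewrite | github.com/Funkymonkey28/Handbook-Parser-Assessment | handbook.py | find_unevaluated_conditions
-- ===== SOURCE A (Python) =====
-- def find_unevaluated_conditions(string_condition):
--     bool_words = ["True", "False", "and", "or"]
--     unevaluated_conditions = []
--     condition = []
--     for word in string_condition.split(" "):
--         # Find consecutive non-bool words. This will form 1 "English" expression that is stored in the condition variable
--         if word not in bool_words:
--             condition.append(word)
--
--         # Consecutive run broken, therefore we have successfully found 1 "English" expression
--         else:
--             if len(condition) != 0:
--                 unevaluated_conditions.append(condition)
--             condition = []
--
--         #Loop continues to look for another "English" expression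
--
--     if len(condition) != 0:
--         unevaluated_conditions.append(condition)
--
--     return unevaluated_conditions
-- ===== SOURCE B (Python) =====
-- def find_unevaluated_conditions(string_condition):
--     BOOL = ("True", "False", "and", "or")
--     words = string_condition.split(" ")
--     n = len(words)
--     result = []
--     i = 0
--     while i < n:
--         if words[i] in BOOL:
--             i += 1
--         else:
--             j = i + 1
--             while j < n and words[j] not in BOOL:
--                 j += 1
--             result.append(words[i:j])
--             i = j
--     return result
-- ===== Notes on version B (the rewrite author's own statement) =====
-- stated objective: alternative
-- what changed: Replaces A's accumulator-and-flush single pass (buffer each word, flush on boolean delimiters and at the end) with a two-pointer run extraction: skip boolean words, otherwise scan to the end of the maximal non-boolean run and slice it out whole.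
import Mathlib
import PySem

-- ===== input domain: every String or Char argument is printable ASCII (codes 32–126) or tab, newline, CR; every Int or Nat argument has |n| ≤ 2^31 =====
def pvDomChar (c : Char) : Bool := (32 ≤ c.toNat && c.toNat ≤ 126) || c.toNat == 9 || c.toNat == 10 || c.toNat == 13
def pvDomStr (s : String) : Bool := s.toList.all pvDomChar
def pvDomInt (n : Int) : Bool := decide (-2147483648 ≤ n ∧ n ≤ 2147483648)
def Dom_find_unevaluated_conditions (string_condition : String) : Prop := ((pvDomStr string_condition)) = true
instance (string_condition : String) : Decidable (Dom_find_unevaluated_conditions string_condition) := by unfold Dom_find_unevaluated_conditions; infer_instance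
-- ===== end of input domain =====

-- B extracts each maximal non-boolean run by a two-pointer scan (skip a boolean word / slice
-- out a whole run at once) instead of A's accumulator-and-flush pass; objective: alternative.

-- ===== PORT A =====
-- step of A's for-loop; state = (unevaluated_conditions, condition)
def pvStepA (st : List (List String) × List String) (word : String) :
    List (List String) × List String :=
  if ¬ (["True", "False", "and", "or"].contains word) then (st.1, st.2 ++ [word])
  else if st.2.length ≠ 0 then (st.1 ++ [st.2], []) else (st.1, [])

def find_unevaluated_conditions (string_condition : String) : List (List String) :=
  let st := ((PySem.Str.split? string_condition " ").getD []).foldl pvStepA ([], [])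
  if st.2.length ≠ 0 then st.1 ++ [st.2] else st.1

-- ===== PORT B =====
-- `word in BOOL` for B's 4-tuple
def pvIsBool (w : String) : Bool := w == "True" || w == "False" || w == "and" || w == "or"

-- B's outer while-loop: skip a boolean word, or slice out the maximal non-boolean run
-- (the inner `while j` scan and the two slices words[i:j], words[j:] are takeWhile/dropWhile)
def pvGoB : List String → List (List String)
  | [] => []
  | w :: ws =>
    if pvIsBool w then pvGoB ws
    else (w :: ws.takeWhile (fun x => !pvIsBool x)) :: pvGoB (ws.dropWhile (fun x => !pvIsBool x))
termination_by l => l.length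
decreasing_by
  · simp only [List.length_cons]; exact Nat.lt_succ_self _
  · simp only [List.length_cons]
    exact Nat.lt_succ_of_le (ws.dropWhile_sublist _).length_le

def find_unevaluated_conditions_alt (string_condition : String) : List (List String) :=
  pvGoB ((PySem.Str.split? string_condition " ").getD [])

-- ===== PRECONDITION & SPEC =====
def Spec_find_unevaluated_conditions (string_condition : String) (out : List (List String)) : Prop := out = find_unevaluated_conditions_alt string_condition
instance (string_condition : String) (out : List (List String)) : Decidable (Spec_find_unevaluated_conditions string_condition out) := by unfold Spec_find_unevaluated_conditions; infer_instance

-- ===== CLAIM (what is proved, stated in full; the proofs are below) =====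
def Claim_equal_find_unevaluated_conditions : Prop := ∀ (string_condition : String), Dom_find_unevaluated_conditions string_condition → Spec_find_unevaluated_conditions string_condition (find_unevaluated_conditions string_condition)

-- ===== LEMMAS AND PROOFS =====

-- A's membership test computes B's disjunction
theorem contains_eq_isBool (w : String) :
    (["True", "False", "and", "or"].contains w) = pvIsBool w := by
  simp only [pvIsBool, List.contains_cons, List.contains_nil, Bool.or_false, Bool.or_assoc]

-- A's final flush, as a function of the loop state
def pvFinishA (st : List (List String) × List String) : List (List String) :=
  if st.2.length ≠ 0 then st.1 ++ [st.2] else st.1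

-- what A's loop still produces, as a function of the pending buffer `cond` and the rest
def pvH (cond : List String) : List String → List (List String)
  | [] => if cond.length ≠ 0 then [cond] else []
  | w :: ws =>
    if pvIsBool w then (if cond.length ≠ 0 then cond :: pvH [] ws else pvH [] ws)
    else pvH (cond ++ [w]) ws

theorem foldA_eq_pvH (ws : List String) : ∀ (acc : List (List String)) (cond : List String),
    pvFinishA (ws.foldl pvStepA (acc, cond)) = acc ++ pvH cond ws := by
  induction ws with
  | nil =>
    intro acc cond
    simp only [List.foldl_nil, pvFinishA, pvH]
    split <;> simp
  | cons w ws ih =>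
    intro acc cond
    rw [List.foldl_cons]
    by_cases hb : pvIsBool w
    · by_cases hc : cond.length ≠ 0
      · have : pvStepA (acc, cond) w = (acc ++ [cond], []) := by
          simp only [pvStepA, contains_eq_isBool]
          rw [if_neg (by simp [hb]), if_pos hc]
        rw [this, ih, pvH]
        simp [hb, hc, List.append_assoc]
      · have : pvStepA (acc, cond) w = (acc, []) := by
          simp only [pvStepA, contains_eq_isBool]
          rw [if_neg (by simp [hb]), if_neg hc]
        rw [this, ih, pvH]
        simp [hb, hc]
    · have : pvStepA (acc, cond) w = (acc, cond ++ [w]) := by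
        simp only [pvStepA, contains_eq_isBool]
        rw [if_pos (by simp [hb])]
      rw [this, ih, pvH]
      simp [hb]

theorem pvH_eq_goB (ws : List String) : ∀ (cond : List String),
    pvH cond ws = if cond = [] then pvGoB ws
      else (cond ++ ws.takeWhile (fun x => !pvIsBool x)) ::
        pvGoB (ws.dropWhile (fun x => !pvIsBool x)) := by
  induction ws with
  | nil =>
    intro cond
    rcases eq_or_ne cond [] with h | h <;> simp [pvH, pvGoB, h, List.length_eq_zero_iff]
  | cons w ws ih =>
    intro cond
    by_cases hb : pvIsBool w
    · have hnil : pvH ([] : List String) ws = pvGoB ws := by rw [ih]; simp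
      rcases eq_or_ne cond [] with h | h
      · simp [pvH, pvGoB, hb, h, hnil]
      · simp [pvH, pvGoB, hb, h, hnil, List.length_eq_zero_iff]
    · have h1 : pvH cond (w :: ws) = pvH (cond ++ [w]) ws := by
        simp only [pvH]; rw [if_neg hb]
      rw [h1, ih, if_neg (by simp)]
      rcases eq_or_ne cond [] with h | h
      · simp [h, pvGoB, hb]
      · simp [h, hb, List.append_assoc]

-- ===== VERDICT (by name: the statement is the Claim_ definition above) =====
theorem find_unevaluated_conditions_spec : Claim_equal_find_unevaluated_conditions := by
  intro s _
  show pvFinishA _ = _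
  rw [foldA_eq_pvH]
  rw [pvH_eq_goB]
  simp [find_unevaluated_conditions_alt]
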